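-- pv_equiv track=rewrite | github.com/brette-0/nesbrette | testing/cmult_sim.py | cmult
-- ===== SOURCE A (Python) =====
-- lssb : object = lambda n: f"{n:08b}"[::-1].index("1")
--
-- mssb : object = lambda n: 7 - f"{n:08b}".index("1")
--
-- def cmult(a : int, c : int) -> int:
--     t : int
--     if mssb(c) != lssb(c):
--         t = a
--         for i in range(0, mssb(c) - lssb(c)):
--             t <<= 1
--             if (c >> (i + lssb(c))) & 1:
--                 a += t
--
--     return (a << lssb(c)) & 0xff
-- ===== SOURCE B (Python) =====
-- # Closed-form replacement for the shift-add loop: the same lssb/mssb bit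
-- # scanners, then one multiplier formula instead of the accumulation loop.
-- lssb : object = lambda n: f"{n:08b}"[::-1].index("1")
--
-- mssb : object = lambda n: 7 - f"{n:08b}".index("1")
--
-- def cmult(a : int, c : int) -> int:
--     L = lssb(c)
--     M = mssb(c)
--     m = 1 + 2 * ((c & ((1 << M) - 1)) >> L)
--     return (a * m << L) & 0xff
-- ===== Notes on version B (the rewrite author's own statement) =====
-- stated objective: simpler
-- what changed: B keeps the same lssb/mssb bit scanners but replaces the shift-add accumulation loop and its branch by one closed-form multiplier 1 + 2*((c & ((1 << M) - 1)) >> L); Pre_ excludes only c = 0, where both A and B raise ValueError.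
import Mathlib
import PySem

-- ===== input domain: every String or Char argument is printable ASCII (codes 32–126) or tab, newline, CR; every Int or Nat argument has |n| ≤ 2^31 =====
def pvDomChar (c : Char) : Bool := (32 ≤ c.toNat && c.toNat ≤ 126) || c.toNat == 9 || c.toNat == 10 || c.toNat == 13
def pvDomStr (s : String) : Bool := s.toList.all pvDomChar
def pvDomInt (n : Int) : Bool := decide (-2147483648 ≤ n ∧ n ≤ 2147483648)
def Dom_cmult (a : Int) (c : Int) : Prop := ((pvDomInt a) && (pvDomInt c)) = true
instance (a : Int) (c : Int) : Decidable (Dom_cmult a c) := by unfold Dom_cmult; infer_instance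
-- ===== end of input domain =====

-- B keeps the same lssb/mssb bit scanners but replaces A's shift-add
-- accumulation loop by one closed-form multiplier; proved equal for every
-- c ≠ 0 (both raise ValueError at c = 0).


-- ===== PORT A =====
-- hand port of the digit part of f"{n:08b}": binary digits of n, MSB first, [] for 0 (exact)
def pyBinDigits (n : Nat) : List Char :=
  if _h : n = 0 then []
  else pyBinDigits (n / 2) ++ [if n % 2 = 1 then '1' else '0']
decreasing_by exact Nat.div_lt_self (Nat.pos_of_ne_zero _h) (by norm_num)

-- hand port of f"{n:08b}": optional '-', zero-padding to TOTAL width 8, binary digits of |n| (exact)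
def pyFmt08b (n : Int) : List Char :=
  let body := if n = 0 then ['0'] else pyBinDigits n.natAbs
  if n < 0 then '-' :: (List.replicate (8 - (body.length + 1)) '0' ++ body)
  else List.replicate (8 - body.length) '0' ++ body

-- lssb = lambda n: f"{n:08b}"[::-1].index("1")   (none = ValueError)
def lssbA (n : Int) : Option Nat := PySem.List.index? (pyFmt08b n).reverse '1'

-- mssb = lambda n: 7 - f"{n:08b}".index("1")   (none = ValueError)
def mssbA (n : Int) : Option Int := (PySem.List.index? (pyFmt08b n) '1').map (fun i => 7 - (i : Int))

def cmult (a : Int) (c : Int) : Int :=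
  match mssbA c, lssbA c with   -- Python evaluates mssb(c) first in `mssb(c) != lssb(c)`
  | some M, some L0 =>
    let L : Int := (L0 : Int)
    let aF : Int :=
      if M ≠ L then
        ((PySem.List.pyRange 0 (M - L) 1).foldl
          (fun (s : Int × Int) i =>
            let t := s.2 <<< (1 : Nat)
            -- the shift count i + lssb(c) is ≥ 0 on every loop iteration, so .toNat is exact
            if PySem.Int.band (c >>> (i + L).toNat) 1 = 1 then (s.1 + t, t) else (s.1, t))
          (a, a)).1
      else a
    PySem.Int.band (aF <<< L.toNat) 255
  | _, _ => 0   -- unreachable under Pre_cmult: Python raises ValueError there (c = 0)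

-- ===== PORT B =====
def cmult_alt (a : Int) (c : Int) : Int :=
  match lssbA c with            -- B computes L = lssb(c) first …
  | none => 0                   -- unreachable under Pre_cmult: Python raises ValueError there (c = 0)
  | some L0 =>
    match mssbA c with          -- … then M = mssb(c)
    | none => 0                 -- unreachable under Pre_cmult (c = 0)
    | some M =>
      let L : Int := (L0 : Int)
      -- the shift counts M and L are ≥ 0 for every c ≠ 0, so .toNat is exact
      let m : Int := 1 + 2 * (PySem.Int.band c (((1 : Int) <<< M.toNat) - 1) >>> L.toNat)
      PySem.Int.band ((a * m) <<< L.toNat) 255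

-- ===== PRECONDITION & SPEC =====
-- Pre_ excludes exactly c = 0, on which A raises ValueError ("1" not found in "00000000");
-- B raises ValueError there too (same lssb scan).
def Pre_cmult (_a : Int) (c : Int) : Prop := c ≠ 0
instance (a : Int) (c : Int) : Decidable (Pre_cmult a c) := by unfold Pre_cmult; infer_instance
def pvWitness_cmult : Int × Int := (3, 10)

def Spec_cmult (a : Int) (c : Int) (out : Int) : Prop := out = cmult_alt a c
instance (a : Int) (c : Int) (out : Int) : Decidable (Spec_cmult a c out) := by unfold Spec_cmult; infer_instance

-- ===== CLAIM (what is proved, stated in full; the proofs are below) =====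
def Claim_equal_cmult : Prop := ∀ (a : Int) (c : Int), Dom_cmult a c → Pre_cmult a c → Spec_cmult a c (cmult a c)

-- ===== LEMMAS AND PROOFS =====

-- number of trailing zero bits (proof-side helper)
def tzN : Nat → Nat
  | m => if _h : m = 0 ∨ m % 2 = 1 then 0 else tzN (m / 2) + 1
decreasing_by exact Nat.div_lt_self (by omega) (by norm_num)

theorem tzN_odd (m : Nat) (h : m % 2 = 1) : tzN m = 0 := by
  rw [tzN]; simp [h]

theorem tzN_even (m : Nat) (h0 : m ≠ 0) (h : m % 2 = 0) : tzN m = tzN (m / 2) + 1 := by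
  rw [tzN]; simp [h0, h]

theorem len_pyBinDigits (m : Nat) : (pyBinDigits m).length = PySem.Int.bitLength (m : Int) := by
  induction m using Nat.strong_induction_on with
  | _ m ih =>
    by_cases h0 : m = 0
    · subst h0; rw [pyBinDigits]; simp [PySem.Int.bitLength_zero]
    · rw [pyBinDigits]; simp only [h0, dite_false]
      rw [List.length_append, ih (m / 2) (Nat.div_lt_self (by omega) (by norm_num)),
        PySem.Int.bitLength_natCast (by omega : 0 < m)]
      simp

theorem pyBinDigits_head (m : Nat) (h : 0 < m) : ∃ rest, pyBinDigits m = '1' :: rest := by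
  induction m using Nat.strong_induction_on with
  | _ m ih =>
    rw [pyBinDigits]; simp only [show m ≠ 0 by omega, dite_false]
    by_cases h2 : m / 2 = 0
    · have hm1 : m = 1 := by omega
      subst hm1
      exact ⟨[], by rw [pyBinDigits]; simp⟩
    · obtain ⟨r, hr⟩ := ih (m / 2) (Nat.div_lt_self h (by norm_num)) (by omega)
      exact ⟨r ++ [if m % 2 = 1 then '1' else '0'], by rw [hr]; simp⟩

-- first '1' in a list led by '0's
theorem idxOf?_replicate_one (k : Nat) (rest : List Char) :
    List.idxOf? '1' (List.replicate k '0' ++ '1' :: rest) = some k := by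
  induction k with
  | zero => simp [List.idxOf?_cons]
  | succ n ih => simp [List.replicate_succ, List.idxOf?_cons, ih]

theorem idxOf?_append_of_some {l l' : List Char} {x : Char} {i : Nat}
    (h : List.idxOf? x l = some i) : List.idxOf? x (l ++ l') = some i := by
  induction l generalizing i with
  | nil => simp [List.idxOf?] at h
  | cons y ys ih =>
    rw [List.cons_append]
    rw [List.idxOf?_cons] at h ⊢
    by_cases hy : (y == x) = true
    · simpa [hy] using h
    · simp only [hy] at h ⊢
      obtain ⟨j, hj, rfl⟩ := Option.map_eq_some_iff.mp h
      simp [ih hj]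

theorem idxOf?_rev_pyBinDigits (m : Nat) (h : 0 < m) :
    List.idxOf? '1' (pyBinDigits m).reverse = some (tzN m) := by
  induction m using Nat.strong_induction_on with
  | _ m ih =>
    rw [pyBinDigits]; simp only [show m ≠ 0 by omega, dite_false]
    rcases Nat.even_or_odd m with he | ho
    · have h2 : m % 2 = 0 := Nat.even_iff.mp he
      have hd : 0 < m / 2 := by omega
      rw [List.reverse_append]
      have hne : ¬ (m % 2 = 1) := by omega
      rw [tzN_even m (by omega) h2]
      have hrec := ih (m / 2) (Nat.div_lt_self h (by norm_num)) hd
      simp [hne, List.idxOf?_cons, hrec]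
    · have h2 : m % 2 = 1 := Nat.odd_iff.mp ho
      rw [List.reverse_append]
      simp [h2, List.idxOf?_cons, tzN_odd m h2]

-- the value A's mssb produces for c ≠ 0
def Mspec (c : Int) : Int := min ((PySem.Int.bitLength c : Int) - 1) (if c > 0 then 7 else 6)

theorem bitLength_pos (c : Int) (hc : c ≠ 0) : 0 < PySem.Int.bitLength c := by
  by_contra h
  have h0 : PySem.Int.bitLength c = 0 := by omega
  have := PySem.Int.lt_two_pow_bitLength c
  rw [h0] at this
  simp at this
  omega

theorem bitLength_natAbs (c : Int) : PySem.Int.bitLength (c.natAbs : Int) = PySem.Int.bitLength c := by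
  rcases Int.natAbs_eq c with h | h
  · rw [← h]
  · conv_rhs => rw [h]
    rw [PySem.Int.bitLength_neg]

theorem lssbA_eq (c : Int) (hc : c ≠ 0) : lssbA c = some (tzN c.natAbs) := by
  have hm : 0 < c.natAbs := Int.natAbs_pos.mpr hc
  unfold lssbA pyFmt08b PySem.List.index?
  simp only [hc, if_false]
  by_cases hneg : c < 0
  · simp only [if_pos hneg]
    rw [List.reverse_cons, List.reverse_append, List.reverse_replicate]
    exact idxOf?_append_of_some (idxOf?_append_of_some (idxOf?_rev_pyBinDigits c.natAbs hm))
  · simp only [if_neg hneg]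
    rw [List.reverse_append, List.reverse_replicate]
    exact idxOf?_append_of_some (idxOf?_rev_pyBinDigits c.natAbs hm)

theorem mssbA_eq (c : Int) (hc : c ≠ 0) : mssbA c = some (Mspec c) := by
  have hm : 0 < c.natAbs := Int.natAbs_pos.mpr hc
  obtain ⟨r, hr⟩ := pyBinDigits_head c.natAbs hm
  have hb : 0 < PySem.Int.bitLength c := bitLength_pos c hc
  have hlen : r.length + 1 = PySem.Int.bitLength c := by
    have := len_pyBinDigits c.natAbs
    rw [hr, bitLength_natAbs] at this
    simpa using this
  unfold mssbA pyFmt08b PySem.List.index?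
  simp only [hc, if_false, hr]
  by_cases hneg : c < 0
  · simp only [if_pos hneg]
    rw [show ('-' :: (List.replicate (8 - (('1' :: r).length + 1)) '0' ++ '1' :: r))
          = List.replicate 0 '0' ++ '-' :: (List.replicate (8 - (('1' :: r).length + 1)) '0' ++ '1' :: r) from rfl]
    simp only [List.idxOf?_cons, List.replicate_zero, List.nil_append,
      show (('-' == '1') = true) = False by decide, if_false, idxOf?_replicate_one, Option.map_some]
    simp only [Mspec, List.length_cons]
    rw [if_neg (by omega : ¬ 0 < c)]
    simp only [Option.bind_eq_bind, Option.bind_some, Option.pure_def, Option.map_some,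
      Option.some.injEq]
    omega
  · simp only [if_neg hneg]
    simp only [List.length_cons]
    rw [idxOf?_replicate_one]
    simp only [Mspec]
    rw [if_pos (by omega : 0 < c)]
    simp only [Option.bind_eq_bind, Option.bind_some, Option.pure_def, Option.map_some,
      Option.some.injEq]
    omega

theorem Mspec_nonneg (c : Int) (hc : c ≠ 0) : 0 ≤ Mspec c := by
  have := bitLength_pos c hc
  unfold Mspec
  rcases le_or_gt c 0 with h | h <;> simp [min_def] <;> omega

-- masking with 2^n - 1 is Euclidean mod (true for negative operands too)
theorem band_mask (y : Int) (n : Nat) :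
    PySem.Int.band y ((2 : Int) ^ n - 1) = y % 2 ^ n := by
  have hP : (0:Int) < 2 ^ n := by positivity
  have hPc : (((2:Nat) ^ n : Nat) : Int) = (2:Int) ^ n := by push_cast; ring
  have h1 : ((2 : Int) ^ n - 1).toNat = 2 ^ n - 1 := by omega
  by_cases hy : 0 ≤ y
  · rw [PySem.Int.band_of_nonneg hy (by omega)]
    rw [h1, Nat.and_two_pow_sub_one_eq_mod]
    have h2 : ((y.toNat : Nat) : Int) = y := by omega
    conv_rhs => rw [← h2]
    rw [← hPc, ← Int.natCast_mod]
  · rw [PySem.Int.band]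
    simp only [if_neg hy, if_pos (by omega : (0:Int) ≤ 2 ^ n - 1)]
    set w : Nat := (-y - 1).toNat with hw
    set q : Nat := w / 2 ^ n with hq
    set r : Nat := w % 2 ^ n with hr
    have hyw : y = -(w : Int) - 1 := by omega
    have hrlt : r < 2 ^ n := Nat.mod_lt _ (by positivity)
    have hrI : (r : Int) < 2 ^ n := by rw [← hPc]; exact_mod_cast hrlt
    have hw' : ((w : Nat) : Int) = (2:Int) ^ n * q + r := by
      rw [← hPc]; exact_mod_cast (Nat.div_add_mod w (2 ^ n)).symm
    rw [h1, Nat.and_comm, Nat.and_two_pow_sub_one_eq_mod, ← hr]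
    rw [show y = ((2:Int) ^ n - 1 - ↑r) + (2:Int) ^ n * (-(↑q) - 1) from by rw [hyw, hw']; ring]
    rw [Int.add_mul_emod_self_left, Int.emod_eq_of_lt (by omega) (by omega)]
    omega

theorem emod_pow_succ (y : Int) (n : Nat) :
    y % 2 ^ (n + 1) = y % 2 ^ n + 2 ^ n * ((y / 2 ^ n) % 2) := by
  have hp : (0 : Int) < 2 ^ n := by positivity
  set q := y / 2 ^ n with hq
  set r := y % 2 ^ n with hr
  have hyy : 2 ^ n * q + r = y := Int.mul_ediv_add_emod y (2 ^ n)
  have hr0 : 0 ≤ r := Int.emod_nonneg y (by omega)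
  have hr1 : r < 2 ^ n := Int.emod_lt_of_pos y hp
  have hq2 : 2 * (q / 2) + q % 2 = q := Int.mul_ediv_add_emod q 2
  have hb0 : 0 ≤ q % 2 := Int.emod_nonneg q (by omega)
  have hb1 : q % 2 < 2 := Int.emod_lt_of_pos q (by omega)
  have hsplit : y = (r + 2 ^ n * (q % 2)) + 2 ^ (n + 1) * (q / 2) := by
    rw [pow_succ]; nlinarith [hyy, hq2]
  conv_lhs => rw [hsplit]
  rw [Int.add_mul_emod_self_left, Int.emod_eq_of_lt (by nlinarith) (by rw [pow_succ]; nlinarith)]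

-- mod 2^M then shift right by L = shift right by L then mod 2^(M-L)
theorem emod_shift (y : Int) (l mm : Nat) (h : l ≤ mm) :
    (y % 2 ^ mm) / 2 ^ l = (y / 2 ^ l) % 2 ^ (mm - l) := by
  have hmm : (0:Int) < 2 ^ mm := by positivity
  set q := y / 2 ^ mm with hqd
  set r := y % 2 ^ mm with hrd
  have hyy : 2 ^ mm * q + r = y := Int.mul_ediv_add_emod y (2 ^ mm)
  have hr0 : 0 ≤ r := Int.emod_nonneg y (by omega)
  have hr1 : r < 2 ^ mm := Int.emod_lt_of_pos y hmm
  have hpp : (2:Int) ^ l * 2 ^ (mm - l) = 2 ^ mm := by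
    rw [← pow_add]; congr 1; omega
  have hsplit : y = r + 2 ^ l * (2 ^ (mm - l) * q) := by
    rw [← mul_assoc, hpp]; omega
  have hdiv : y / 2 ^ l = r / 2 ^ l + 2 ^ (mm - l) * q := by
    conv_lhs => rw [hsplit]
    rw [Int.add_mul_ediv_left _ _ (by positivity : (2:Int) ^ l ≠ 0)]
  rw [hdiv, Int.add_mul_emod_self_left]
  have h0 : 0 ≤ r / 2 ^ l := Int.ediv_nonneg hr0 (by positivity)
  have h1 : r / 2 ^ l < 2 ^ (mm - l) := by
    rw [Int.ediv_lt_iff_lt_mul (by positivity)]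
    calc r < 2 ^ mm := hr1
    _ = 2 ^ (mm - l) * 2 ^ l := by rw [← pow_add]; congr 1; omega
  exact (Int.emod_eq_of_lt h0 h1).symm

-- the shift-add loop computes a * (1 + 2 * (x mod 2^n)) and carries t = a * 2^n
theorem loop_spec (x a : Int) (n : Nat) :
    List.foldl
      (fun (s : Int × Int) i =>
        let t := s.2 <<< (1 : Nat)
        if PySem.Int.band (x >>> i.toNat) 1 = 1 then (s.1 + t, t) else (s.1, t))
      (a, a) (PySem.List.pyRange 0 (n : Int) 1)
    = (a * (1 + 2 * (x % 2 ^ n)), a * 2 ^ n) := by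
  induction n with
  | zero =>
    rw [Nat.cast_zero, PySem.List.pyRange_one_eq_nil le_rfl]
    simp
  | succ n ih =>
    have hcast : ((n + 1 : Nat) : Int) = (n : Int) + 1 := by push_cast; ring
    rw [hcast, PySem.List.pyRange_one_succ_right (by positivity), List.foldl_append, ih]
    simp only [List.foldl_cons, List.foldl_nil, Int.shiftRight_natCast_right]
    have htoNat : ((n : Int)).toNat = n := Int.toNat_natCast n
    have hshift : x >>> n = x / 2 ^ n := by
      rw [Int.shiftRight_eq_div_pow]; push_cast; ring_nf
    have hband : PySem.Int.band (x >>> ((n : Int)).toNat) 1 = (x / 2 ^ n) % 2 := by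
      rw [htoNat, PySem.Int.band_one, PySem.Int.mod_eq_emod_of_pos (by norm_num), hshift]
    have hb0 : 0 ≤ (x / 2 ^ n) % 2 := Int.emod_nonneg _ (by norm_num)
    have hb1 : (x / 2 ^ n) % 2 < 2 := Int.emod_lt_of_pos _ (by norm_num)
    have ht : (a * 2 ^ n) <<< (1 : Nat) = a * 2 ^ (n + 1) := by
      rw [Int.shiftLeft_eq]; ring
    by_cases hbit : (x / 2 ^ n) % 2 = 1
    · simp only [hband, hbit, ht]
      rw [emod_pow_succ x n, hbit, Prod.mk.injEq]
      norm_num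
      ring
    · have hbit0 : (x / 2 ^ n) % 2 = 0 := by omega
      simp only [hband, if_neg hbit, ht]
      rw [emod_pow_succ x n, hbit0, Prod.mk.injEq]
      norm_num

-- ===== VERDICT (by name: the statement is the Claim_ definition above) =====
theorem cmult_spec : Claim_equal_cmult := by
  intro a c _hdom hc
  unfold Spec_cmult
  set L : Nat := tzN c.natAbs with hL
  set M : Int := Mspec c with hM
  have hM0 : 0 ≤ M := Mspec_nonneg c hc
  have htoL : ((L : Int)).toNat = L := Int.toNat_natCast L
  -- reduce port A
  have hA : cmult a c =
      PySem.Int.band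
        ((if M ≠ (L : Int) then
            ((PySem.List.pyRange 0 (M - (L : Int)) 1).foldl
              (fun (s : Int × Int) i =>
                let t := s.2 <<< (1 : Nat)
                if PySem.Int.band (c >>> (i + (L : Int)).toNat) 1 = 1 then (s.1 + t, t) else (s.1, t))
              (a, a)).1
          else a) <<< ((L : Int)).toNat) 255 := by
    rw [cmult, mssbA_eq c hc, lssbA_eq c hc]
  -- reduce port B
  have hB : cmult_alt a c =
      PySem.Int.band
        ((a * (1 + 2 * (PySem.Int.band c (((1 : Int) <<< M.toNat) - 1) >>> ((L : Int)).toNat)))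
          <<< ((L : Int)).toNat) 255 := by
    rw [cmult_alt, lssbA_eq c hc, mssbA_eq c hc]
  rw [hA, hB]
  congr 1
  congr 1
  -- B's multiplier reduces to 1 + 2 * ((c mod 2^M) / 2^L)
  have hmaskB : PySem.Int.band c (((1 : Int) <<< M.toNat) - 1) = c % 2 ^ M.toNat := by
    have h1 : (1 : Int) <<< M.toNat = 2 ^ M.toNat := by rw [Int.shiftLeft_eq]; ring
    rw [h1, band_mask]
  have hshB : (c % 2 ^ M.toNat) >>> L = (c % 2 ^ M.toNat) / 2 ^ L := by
    rw [Int.shiftRight_eq_div_pow]; push_cast; ring_nf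
  have hr0 : (0:Int) ≤ c % 2 ^ M.toNat := Int.emod_nonneg c (by positivity)
  have hr1 : c % 2 ^ M.toNat < 2 ^ M.toNat := Int.emod_lt_of_pos c (by positivity)
  rw [hmaskB, htoL, hshB]
  rcases lt_trichotomy M ((L : Int)) with hlt | heq | hgt
  · -- empty loop; B's masked value is below 2^L so the quotient is 0
    rw [if_pos (by omega : M ≠ (L : Int)), PySem.List.pyRange_one_eq_nil (by omega)]
    have hq0 : (c % 2 ^ M.toNat) / 2 ^ L = 0 := by
      apply Int.ediv_eq_zero_of_lt hr0
      calc c % 2 ^ M.toNat < 2 ^ M.toNat := hr1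
      _ ≤ 2 ^ L := by
        apply pow_le_pow_right₀ (by norm_num)
        omega
    rw [hq0]
    simp
  · rw [if_neg (by omega : ¬ M ≠ (L : Int))]
    have hML : M.toNat = L := by omega
    have hq0 : (c % 2 ^ M.toNat) / 2 ^ L = 0 :=
      Int.ediv_eq_zero_of_lt hr0 (by rw [← hML]; exact hr1)
    rw [hq0]
    ring
  · -- the real loop: n = M - L > 0 iterations
    set n : Nat := (M - (L : Int)).toNat with hn
    have hnM : M - (L : Int) = (n : Int) := by omega
    rw [if_pos (by omega : M ≠ (L : Int)), hnM]
    set x : Int := c >>> L with hx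
    have hcong : (PySem.List.pyRange 0 (n : Int) 1).foldl
        (fun (s : Int × Int) i =>
          let t := s.2 <<< (1 : Nat)
          if PySem.Int.band (c >>> (i + (L : Int)).toNat) 1 = 1 then (s.1 + t, t) else (s.1, t))
        (a, a)
      = (PySem.List.pyRange 0 (n : Int) 1).foldl
        (fun (s : Int × Int) i =>
          let t := s.2 <<< (1 : Nat)
          if PySem.Int.band (x >>> i.toNat) 1 = 1 then (s.1 + t, t) else (s.1, t))
        (a, a) := by
      refine PySem.List.foldl_congr_mem _ _ _ _ ?_
      intro acc i hi
      have hib := PySem.List.mem_pyRange_one.mp hi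
      have hiL : (i + (L : Int)).toNat = L + i.toNat := by omega
      rw [hiL, Int.shiftRight_add, Int.shiftRight_natCast_right]
    rw [hcong, loop_spec x a n]
    have hxdiv : x = c / 2 ^ L := by
      rw [hx, Int.shiftRight_eq_div_pow]; push_cast; ring_nf
    have hMn : M.toNat - L = n := by omega
    have hLM : L ≤ M.toNat := by omega
    rw [hxdiv, ← hMn, ← emod_shift c L M.toNat hLM]
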